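-- pv_equiv track=rewrite | github.com/guojihu-hana/PipelineSimulator | tuning.py | balanced_transpose
-- ===== SOURCE A (Python) =====
-- import heapq
--
-- def balanced_transpose(placement, layer_comp_time):
--     # 原始行的总开销
--     original_cost = [sum(layer_comp_time[l] for l in row) for row in placement]
--     num_rows = len(placement)
--
--     lid_time_list = []
--     for lid in range(len(layer_comp_time)):
--         lid_time_list.append((lid, round(layer_comp_time[lid], 0)))
--     lid_time_list.sort(key=lambda x: x[1])
--
--     # 新的空 placement
--     new_place = [[] for _ in range(num_rows)]
--     new_cost = [0] * num_rows
--
--     # 一个小根堆按 (当前开销, 行号) 排序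
--     # 这样每次将更重的 layer 放到当前最轻的行
--     heap = [(0, i) for i in range(num_rows)]
--     heapq.heapify(heap)
--
--     # 按 comp time 从大到小填充
--     for lid, time in lid_time_list:
--         cost, idx = heapq.heappop(heap)
--         new_place[idx].append(lid)
--         new_cost[idx] += time
--         heapq.heappush(heap, (new_cost[idx], idx))
--
--     # 最终按每行第一个 layer 升序排序保证干净布局
--     for row in new_place:
--         row.sort()
--     new_place.sort(key=lambda row: row[0] if row else 1e9)
--     return new_place
-- ===== SOURCE B (Python) =====
-- def balanced_transpose(placement, layer_comp_time):
--     # kept dead line (can raise exactly like A's)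
--     original_cost = [sum(layer_comp_time[l] for l in row) for row in placement]
--     num_rows = len(placement)
--
--     lid_time_list = [(lid, round(t, 0)) for lid, t in enumerate(layer_comp_time)]
--     lid_time_list.sort(key=lambda x: x[1])
--
--     new_place = [[] for _ in range(num_rows)]
--     new_cost = [0] * num_rows
--
--     # no heap: each layer goes to the first currently-lightest row (linear min scan)
--     for lid, time in lid_time_list:
--         idx = new_cost.index(min(new_cost))
--         new_place[idx].append(lid)
--         new_cost[idx] += time
--
--     for row in new_place:
--         row.sort()
--     new_place.sort(key=lambda row: row[0] if row else 1e9)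
--     return new_place
-- ===== Notes on version B (the rewrite author's own statement) =====
-- stated objective: simpler
-- what changed: Replaced the heapq priority queue (heapify/heappop/heappush of (cost,row) tuples) by a plain running-cost list: each layer goes to new_cost.index(min(new_cost)), the first currently-lightest row.
import Mathlib
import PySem

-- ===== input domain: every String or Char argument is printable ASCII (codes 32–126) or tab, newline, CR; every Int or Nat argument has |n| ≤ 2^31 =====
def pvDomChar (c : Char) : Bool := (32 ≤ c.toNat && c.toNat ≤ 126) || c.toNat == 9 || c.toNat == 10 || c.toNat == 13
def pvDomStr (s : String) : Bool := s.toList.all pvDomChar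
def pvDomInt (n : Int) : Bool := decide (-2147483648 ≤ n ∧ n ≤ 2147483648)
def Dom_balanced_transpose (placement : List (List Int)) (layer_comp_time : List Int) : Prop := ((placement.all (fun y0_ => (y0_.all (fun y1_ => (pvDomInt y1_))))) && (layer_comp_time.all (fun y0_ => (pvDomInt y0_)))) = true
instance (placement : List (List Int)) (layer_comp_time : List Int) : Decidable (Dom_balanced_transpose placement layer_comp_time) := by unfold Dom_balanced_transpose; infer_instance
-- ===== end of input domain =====

-- B replaces A's heapq priority queue by a plain running-cost list with a linear
-- `index(min(...))` scan per layer — simpler (no heap), same results.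

-- ===== PORT A =====
-- Python's `<` on the heap's (cost, idx) int tuples: lexicographic.
def pvLexLt (a b : Int × Nat) : Bool := a.1 < b.1 || (a.1 == b.1 && decide (a.2 < b.2))

def pvHeapMin : Int × Nat → List (Int × Nat) → Int × Nat
  | best, [] => best
  | best, x :: xs => pvHeapMin (if pvLexLt x best then x else best) xs

-- heapq modeled by its observable behaviour: heappop returns the minimum pair
-- (Python tuple order) and removes it; exact, since pop order is all A observes.
def pvHeapPop? : List (Int × Nat) → Option ((Int × Nat) × List (Int × Nat))
  | [] => none
  | x :: xs => some (pvHeapMin x xs, (x :: xs).erase (pvHeapMin x xs))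

def pvALoop : List (Int × Int) → List (List Int) × List Int × List (Int × Nat) →
    List (List Int) × List Int × List (Int × Nat)
  | [], st => st
  | (lid, time) :: rest, (place, cost, heap) =>
    match pvHeapPop? heap with
    | none => (place, cost, heap)  -- Python: heappop([]) raises IndexError; excluded by Pre_
    | some ((_, idx), h) =>
      let place' := place.modify idx (fun r => r ++ [lid])
      let cost' := cost.modify idx (fun c => c + time)
      pvALoop rest (place', cost', h ++ [(cost'.getD idx 0, idx)])

def balanced_transpose (placement : List (List Int)) (layer_comp_time : List Int) : List (List Int) :=
  -- dead `original_cost` line kept: its possible IndexError is excluded by Pre_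
  let _original_cost := placement.map
      (fun row => (row.map (fun l => (PySem.List.pyGet? layer_comp_time l).getD 0)).sum)
  let num_rows := placement.length
  -- round(t, 0) of an int is the int itself
  let lid_time_list := (PySem.List.pyRange 0 layer_comp_time.length 1).map
      (fun lid => (lid, PySem.List.pyGetD layer_comp_time lid 0))
  let lid_time_list := PySem.List.sorted lid_time_list (fun x => x.2) false
  let new_place := List.replicate num_rows ([] : List Int)
  let new_cost := List.replicate num_rows (0 : Int)
  -- heapify of [(0,0),…,(0,n-1)] leaves the heap's content unchanged
  let heap := (List.range num_rows).map (fun i => ((0 : Int), i))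
  let st := pvALoop lid_time_list (new_place, new_cost, heap)
  let new_place2 := st.1.map (fun row => PySem.List.sorted row (fun x => x) false)
  -- `row[0] if row else 1e9`: row heads are layer ids < 10^9, so the Int 10^9 is exact
  PySem.List.sorted new_place2 (fun row => row.headD 1000000000) false

-- ===== PORT B =====
def pvBLoop : List (Int × Int) → List (List Int) × List Int → List (List Int) × List Int
  | [], st => st
  | (lid, time) :: rest, (place, cost) =>
    match PySem.List.min? cost (fun x => x) with
    | none => (place, cost)  -- Python: min([]) raises ValueError; excluded by Pre_
    | some m =>
      let idx := (PySem.List.index? cost m).getD 0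
      pvBLoop rest (place.modify idx (fun r => r ++ [lid]), cost.modify idx (fun c => c + time))

def balanced_transpose_alt (placement : List (List Int)) (layer_comp_time : List Int) : List (List Int) :=
  -- dead `original_cost` line kept: its possible IndexError is excluded by Pre_
  let _original_cost := placement.map
      (fun row => (row.map (fun l => (PySem.List.pyGet? layer_comp_time l).getD 0)).sum)
  let num_rows := placement.length
  let lid_time_list := PySem.List.sorted (PySem.List.enumerate layer_comp_time) (fun x => x.2) false
  let st := pvBLoop lid_time_list (List.replicate num_rows ([] : List Int), List.replicate num_rows (0 : Int))
  let new_place2 := st.1.map (fun row => PySem.List.sorted row (fun x => x) false)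
  PySem.List.sorted new_place2 (fun row => row.headD 1000000000) false

-- ===== PRECONDITION & SPEC =====
-- Pre_ excludes exactly the inputs where the Python raises: a layer index in `placement`
-- outside range of `layer_comp_time` (IndexError in the dead original_cost line), and an
-- empty `placement` with a nonempty `layer_comp_time` (heappop/min on an empty structure).
def Pre_balanced_transpose (placement : List (List Int)) (layer_comp_time : List Int) : Prop :=
  (∀ row ∈ placement, ∀ l ∈ row, PySem.Raise.InRange layer_comp_time.length l) ∧
  (placement = [] → layer_comp_time = [])
instance (placement : List (List Int)) (layer_comp_time : List Int) : Decidable (Pre_balanced_transpose placement layer_comp_time) := by unfold Pre_balanced_transpose; infer_instance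

def pvWitness_balanced_transpose : List (List Int) × List Int := ([[0], [1]], [3, 1])

def Spec_balanced_transpose (placement : List (List Int)) (layer_comp_time : List Int) (out : List (List Int)) : Prop := out = balanced_transpose_alt placement layer_comp_time
instance (placement : List (List Int)) (layer_comp_time : List Int) (out : List (List Int)) : Decidable (Spec_balanced_transpose placement layer_comp_time out) := by unfold Spec_balanced_transpose; infer_instance

-- ===== CLAIM (what is proved, stated in full; the proofs are below) =====
def Claim_equal_balanced_transpose : Prop := ∀ (placement : List (List Int)) (layer_comp_time : List Int), Dom_balanced_transpose placement layer_comp_time → Pre_balanced_transpose placement layer_comp_time → Spec_balanced_transpose placement layer_comp_time (balanced_transpose placement layer_comp_time)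

-- ===== LEMMAS AND PROOFS =====

def pvIsMin (l : List (Int × Nat)) (x : Int × Nat) : Prop :=
  x ∈ l ∧ ∀ y ∈ l, pvLexLt y x = false

theorem pvLexLt_false_trans {x y z : Int × Nat} (h1 : pvLexLt y x = false)
    (h2 : pvLexLt z y = false) : pvLexLt z x = false := by
  rcases x with ⟨x1, x2⟩; rcases y with ⟨y1, y2⟩; rcases z with ⟨z1, z2⟩
  simp [pvLexLt] at h1 h2 ⊢
  omega

theorem pvLexLt_false_of_true {x y z : Int × Nat} (h1 : pvLexLt y x = false)
    (h2 : pvLexLt y z = true) : pvLexLt z x = false := by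
  rcases x with ⟨x1, x2⟩; rcases y with ⟨y1, y2⟩; rcases z with ⟨z1, z2⟩
  simp [pvLexLt] at h1 h2 ⊢
  omega

theorem pvHeapMin_isMin : ∀ (xs : List (Int × Nat)) (best : Int × Nat),
    pvIsMin (best :: xs) (pvHeapMin best xs) := by
  intro xs
  induction xs with
  | nil =>
    intro best
    refine ⟨by simp [pvHeapMin], ?_⟩
    intro y hy
    simp at hy
    subst hy
    simp [pvHeapMin, pvLexLt]
  | cons x xs ih =>
    intro best
    by_cases hc : pvLexLt x best = true
    · have hml := ih x
      simp only [pvHeapMin, if_pos hc]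
      refine ⟨?_, ?_⟩
      · rcases List.mem_cons.mp hml.1 with h | h
        · rw [h]; exact List.mem_cons_of_mem _ List.mem_cons_self
        · exact List.mem_cons_of_mem _ (List.mem_cons_of_mem _ h)
      · intro y hy
        rcases List.mem_cons.mp hy with rfl | hy2
        · exact pvLexLt_false_of_true (hml.2 x List.mem_cons_self) hc
        rcases List.mem_cons.mp hy2 with rfl | hy3
        · exact hml.2 y List.mem_cons_self
        · exact hml.2 y (List.mem_cons_of_mem _ hy3)
    · have hcf : pvLexLt x best = false := by simpa using hc
      have hml := ih best
      simp only [pvHeapMin, if_neg hc]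
      refine ⟨?_, ?_⟩
      · rcases List.mem_cons.mp hml.1 with h | h
        · rw [h]; exact List.mem_cons_self
        · exact List.mem_cons_of_mem _ (List.mem_cons_of_mem _ h)
      · intro y hy
        rcases List.mem_cons.mp hy with rfl | hy2
        · exact hml.2 y List.mem_cons_self
        rcases List.mem_cons.mp hy2 with rfl | hy3
        · exact pvLexLt_false_trans (hml.2 best List.mem_cons_self) hcf
        · exact hml.2 y (List.mem_cons_of_mem _ hy3)

theorem pvIsMin_perm {l l' : List (Int × Nat)} {x : Int × Nat}
    (hp : l.Perm l') (hx : pvIsMin l x) : pvIsMin l' x :=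
  ⟨hp.mem_iff.mp hx.1, fun y hy => hx.2 y (hp.mem_iff.mpr hy)⟩

theorem pv_mem_zipIdx {p : Int × Nat} {xs : List Int} :
    p ∈ xs.zipIdx ↔ ∃ (i : Nat) (h : i < xs.length), p = (xs[i], i) := by
  constructor
  · intro h
    rcases p with ⟨c, i⟩
    rcases List.mem_zipIdx h with ⟨_, hlt, he⟩
    exact ⟨i, by simpa using hlt, by simp [he]⟩
  · rintro ⟨i, h, rfl⟩
    have hg : (xs.zipIdx)[i]'(by simpa using h) = (xs[i], i) := by
      simp [List.getElem_zipIdx]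
    exact hg ▸ List.getElem_mem _

-- the minimum of the (cost, idx) multiset is (min cost, first index attaining it)
theorem pv_min_char {cost : List Int} {M : Int × Nat}
    (hM : pvIsMin cost.zipIdx M) :
    PySem.List.min? cost (fun x => x) = some M.1 ∧
    PySem.List.index? cost M.1 = some M.2 := by
  rcases pv_mem_zipIdx.mp hM.1 with ⟨i, hi, he⟩
  obtain ⟨he1, he2⟩ : M.1 = cost[i] ∧ M.2 = i := by rw [he]; exact ⟨rfl, rfl⟩
  have him : M.1 ∈ cost := he1 ▸ List.getElem_mem hi
  have hne : cost ≠ [] := by intro h; subst h; simp at hi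
  obtain ⟨m', hm'⟩ : ∃ m', PySem.List.min? cost (fun x => x) = some m' := by
    cases hmm : PySem.List.min? cost (fun x => x) with
    | none => exact absurd ((PySem.List.min?_eq_none_iff cost _).mp hmm) hne
    | some m' => exact ⟨m', rfl⟩
  have h1 : m' ≤ M.1 := PySem.List.min?_isMin hm' M.1 him
  have h2 : M.1 ≤ m' := by
    rcases List.mem_iff_getElem.mp (PySem.List.min?_mem hm') with ⟨k, hk, hke⟩
    have hb := hM.2 (m', k) (pv_mem_zipIdx.mpr ⟨k, hk, by simp [hke]⟩)
    simp [pvLexLt] at hb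
    omega
  have hmeq : m' = M.1 := le_antisymm h1 h2
  refine ⟨hmeq ▸ hm', ?_⟩
  have hsome : (PySem.List.index? cost M.1).isSome :=
    (PySem.List.index?_isSome_iff cost M.1).mpr him
  obtain ⟨j', hj'⟩ := Option.isSome_iff_exists.mp hsome
  rcases PySem.List.getElem_of_index?_eq_some hj' with ⟨hjlt, hjv, hjfirst⟩
  have hle1 : j' ≤ M.2 := by
    by_contra h
    have hi2 : M.2 < j' := by omega
    have hv : cost[M.2]'(by omega) ≠ M.1 := hjfirst M.2 hi2
    exact hv (by simp only [he2]; exact he1.symm)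
  have hle2 : M.2 ≤ j' := by
    have hb := hM.2 (M.1, j') (pv_mem_zipIdx.mpr ⟨j', hjlt, by simp [hjv]⟩)
    simp [pvLexLt] at hb
    omega
  have hje : j' = M.2 := by omega
  exact hje ▸ hj'

-- erase-the-min-then-push re-described as the updated cost list's index pairs
theorem pv_heap_step (cost : List Int) (i : Nat) (hi : i < cost.length) (t : Int) :
    ((cost.zipIdx).erase (cost[i], i) ++ [(cost[i] + t, i)]).Perm
      ((cost.modify i (fun c => c + t)).zipIdx) := by
  have hlen : (cost.take i).length = i := by simp; omega
  have hz : cost.zipIdx =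
      (cost.take i).zipIdx ++ ((cost[i], i) :: (cost.drop (i + 1)).zipIdx (i + 1)) := by
    conv_lhs => rw [← List.take_append_drop i cost, List.drop_eq_getElem_cons hi]
    rw [List.zipIdx_append, List.zipIdx_cons]
    simp [hlen]
  have hnotmem : (cost[i], i) ∉ (cost.take i).zipIdx := by
    intro hmem
    rcases List.mem_zipIdx hmem with ⟨_, hlt, _⟩
    simp [hlen] at hlt
  have hz' : (cost.modify i (fun c => c + t)).zipIdx =
      (cost.take i).zipIdx ++ ((cost[i] + t, i) :: (cost.drop (i + 1)).zipIdx (i + 1)) := by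
    conv_lhs => rw [List.modify_eq_take_cons_drop hi]
    rw [List.zipIdx_append, List.zipIdx_cons]
    simp [hlen]
  rw [hz, hz', List.erase_append, if_neg hnotmem, List.erase_cons_head]
  exact (List.perm_append_singleton _ _).trans List.perm_middle.symm

theorem pv_loop_eq : ∀ (ltl : List (Int × Int)) (place : List (List Int)) (cost : List Int)
    (heap : List (Int × Nat)), heap.Perm cost.zipIdx →
    (pvALoop ltl (place, cost, heap)).1 = (pvBLoop ltl (place, cost)).1 := by
  intro ltl
  induction ltl with
  | nil => intro _ _ _ _; rfl
  | cons p rest ih =>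
    rcases p with ⟨lid, time⟩
    intro place cost heap hp
    by_cases hc : cost = []
    · subst hc
      have hh : heap = [] := hp.eq_nil
      subst hh
      simp [pvALoop, pvBLoop, pvHeapPop?, PySem.List.min?]
    · obtain ⟨x, xs, rfl⟩ : ∃ x xs, heap = x :: xs := by
        cases heap with
        | nil => exact absurd (List.zipIdx_eq_nil_iff.mp hp.symm.eq_nil) hc
        | cons x xs => exact ⟨x, xs, rfl⟩
      have hM : pvIsMin (cost.zipIdx) (pvHeapMin x xs) :=
        pvIsMin_perm hp (pvHeapMin_isMin xs x)
      set M := pvHeapMin x xs with hMdef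
      rcases pv_min_char hM with ⟨hmin?, hidx?⟩
      rcases pv_mem_zipIdx.mp hM.1 with ⟨i, hi, he⟩
      obtain ⟨he1, he2⟩ : M.1 = cost[i] ∧ M.2 = i := by rw [he]; exact ⟨rfl, rfl⟩
      have hgetD : (cost.modify M.2 (fun c => c + time)).getD M.2 0 = M.1 + time := by
        rw [List.getD_eq_getElem _ _ (by simpa using (he2 ▸ hi)), List.getElem_modify]
        simp [he2, he1]
      have hperm : (((x :: xs).erase M) ++ [(M.1 + time, M.2)]).Perm
          ((cost.modify M.2 (fun c => c + time)).zipIdx) := by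
        refine ((hp.erase M).append_right _).trans ?_
        rw [he1, he2, he]
        exact pv_heap_step cost i hi time
      simp only [pvALoop, pvBLoop, pvHeapPop?, ← hMdef, hmin?, hidx?, hgetD, Option.getD_some]
      exact ih _ _ _ hperm

theorem pv_init_heap (n : Nat) :
    ((List.range n).map (fun i => ((0 : Int), i))).Perm ((List.replicate n (0 : Int)).zipIdx) := by
  have he : (List.replicate n (0 : Int)).zipIdx = (List.range n).map (fun i => ((0 : Int), i)) := by
    apply List.ext_getElem
    · simp
    · intro i h1 h2
      rw [List.getElem_zipIdx]
      simp
  rw [he]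

theorem pv_lid_time_lists (layer_comp_time : List Int) :
    PySem.List.enumerate layer_comp_time =
      (PySem.List.pyRange 0 layer_comp_time.length 1).map
        (fun lid => (lid, PySem.List.pyGetD layer_comp_time lid 0)) := by
  simpa [PySem.List.len] using PySem.List.enumerate_eq_map_pyRange layer_comp_time 0

-- ===== VERDICT (by name: the statement is the Claim_ definition above) =====
theorem balanced_transpose_spec : Claim_equal_balanced_transpose := by
  unfold Claim_equal_balanced_transpose
  intro placement layer_comp_time _ _
  unfold Spec_balanced_transpose
  simp only [balanced_transpose, balanced_transpose_alt]
  rw [pv_lid_time_lists]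
  rw [pv_loop_eq _ _ _ _ (pv_init_heap placement.length)]
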